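-- pv_equiv track=rewrite | github.com/Wos2610/Python | ThucHanh/DÃY SỐ ĐỘC ĐẮC.py | is_unique_sequence
-- ===== SOURCE A (Python) =====
-- def is_unique_sequence(a):
--     def is_unique(subsequence):
--         return any(subsequence.count(x) == 1 for x in subsequence)
--
--     for start in range(len(a)):
--         for end in range(start + 1, len(a) + 1):
--             if not is_unique(a[start:end]):
--                 return False
--     return True
-- ===== SOURCE B (Python) =====
-- def is_unique_sequence(a):
--     n = len(a)
--     for start in range(n):
--         cnt = {}
--         uniq = 0
--         for end in range(start, n):
--             x = a[end]
--             c = cnt.get(x, 0)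
--             cnt[x] = c + 1
--             if c == 0:
--                 uniq += 1
--             elif c == 1:
--                 uniq -= 1
--             if uniq == 0:
--                 return False
--     return True
-- ===== Notes on version B (the rewrite author's own statement) =====
-- stated objective: faster
-- what changed: Instead of re-slicing and re-counting every subarray (count inside any inside two loops), B extends each window one element to the right while incrementally maintaining a hash-map of counts and the number of values occurring exactly once, so each window is checked in O(1) amortized.
import Mathlib
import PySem

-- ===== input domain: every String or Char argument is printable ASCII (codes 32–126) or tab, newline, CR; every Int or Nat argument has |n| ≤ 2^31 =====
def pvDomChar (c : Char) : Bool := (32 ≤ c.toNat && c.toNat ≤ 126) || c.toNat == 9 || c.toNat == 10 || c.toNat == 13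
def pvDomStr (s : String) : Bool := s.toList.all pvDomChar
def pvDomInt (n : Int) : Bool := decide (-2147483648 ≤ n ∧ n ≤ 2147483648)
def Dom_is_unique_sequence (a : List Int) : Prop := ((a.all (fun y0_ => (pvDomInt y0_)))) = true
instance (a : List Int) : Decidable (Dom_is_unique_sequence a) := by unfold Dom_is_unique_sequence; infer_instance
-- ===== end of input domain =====

-- B replaces A's slice-and-recount check of every subarray by one rightward sweep per start that
-- incrementally maintains a dict of counts and the number of window elements occurring exactly once.

-- ===== PORT A =====
-- is_unique(subsequence): any(subsequence.count(x) == 1 for x in subsequence)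
def pvIsUniqueA (w : List Int) : Bool := w.any (fun x => PySem.List.count w x == 1)

-- inner loop 'for end in range(start+1, len(a)+1): if not is_unique(a[start:end]): return False'
def pvLoopEndA (a : List Int) (s : Int) : List Int → Bool
  | [] => true
  | e :: rest =>
    if !(pvIsUniqueA (PySem.List.slice a (some s) (some e))) then false
    else pvLoopEndA a s rest

-- outer loop 'for start in range(len(a)): …'; an inner 'return False' propagates out
def pvLoopStartA (a : List Int) : List Int → Bool
  | [] => true
  | s :: rest =>
    if pvLoopEndA a s (PySem.List.pyRange (s + 1) ((a.length : Int) + 1) 1) then pvLoopStartA a rest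
    else false

def is_unique_sequence (a : List Int) : Bool :=
  pvLoopStartA a (PySem.List.pyRange 0 (a.length : Int) 1)

-- ===== PORT B =====
-- inner loop of Source B: extend the window by a[end], maintain cnt (counts) and uniq (#values with count 1);
-- a[end] is ported as pyGetD with default 0 — end always lies in range here
def pvInnerB (a : List Int) : List Int → PySem.Dict Int Int → Int → Bool
  | [], _, _ => true
  | e :: rest, cnt, uniq =>
    let x := PySem.List.pyGetD a e 0
    let c := cnt.getD x 0
    let cnt' := cnt.insert x (c + 1)
    let uniq' := if c == 0 then uniq + 1 else if c == 1 then uniq - 1 else uniq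
    if uniq' == 0 then false else pvInnerB a rest cnt' uniq'

-- outer loop of Source B; the inner 'return False' propagates out
def pvOuterB (a : List Int) : List Int → Bool
  | [] => true
  | s :: rest =>
    if pvInnerB a (PySem.List.pyRange s (a.length : Int) 1) PySem.Dict.empty 0 then pvOuterB a rest
    else false

def is_unique_sequence_alt (a : List Int) : Bool :=
  pvOuterB a (PySem.List.pyRange 0 (a.length : Int) 1)

-- ===== PRECONDITION & SPEC =====
def Spec_is_unique_sequence (a : List Int) (out : Bool) : Prop := out = is_unique_sequence_alt a
instance (a : List Int) (out : Bool) : Decidable (Spec_is_unique_sequence a out) := by unfold Spec_is_unique_sequence; infer_instance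

-- ===== CLAIM (what is proved, stated in full; the proofs are below) =====
def Claim_equal_is_unique_sequence : Prop := ∀ (a : List Int), Dom_is_unique_sequence a → Spec_is_unique_sequence a (is_unique_sequence a)

-- ===== LEMMAS AND PROOFS =====

-- the window a[s:e] (natural bounds)
def pvW (a : List Int) (s e : Nat) : List Int := (a.drop s).take (e - s)

-- number of values occurring exactly once in w (each contributes exactly one occurrence, so countP counts values)
def pvU (w : List Int) : Nat := w.countP (fun x => w.count x == 1)

theorem pv_countP_split (l : List Int) (p q : Int → Bool) :
    l.countP p = l.countP (fun y => q y && p y) + l.countP (fun y => !q y && p y) := by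
  induction l with
  | nil => simp
  | cons a t ih =>
    simp only [List.countP_cons, ih]
    cases hq : q a <;> cases hp : p a <;> simp <;> omega

theorem pv_countP_beq_and (l : List Int) (x : Int) (q : Int → Bool) :
    l.countP (fun y => (y == x) && q y) = if q x then l.count x else 0 := by
  induction l with
  | nil => simp
  | cons a t ih =>
    by_cases hax : a = x
    · subst hax
      cases hq : q a <;> simp [ih, hq]
    · simp [hax, ih]

theorem pvIsUniqueA_eq (w : List Int) : pvIsUniqueA w = !(pvU w == 0) := by
  unfold pvIsUniqueA pvU
  simp only [PySem.List.count_eq]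
  cases h : w.any (fun x => w.count x == 1) with
  | false =>
    have h0 : w.countP (fun x => w.count x == 1) = 0 :=
      List.countP_eq_zero.mpr (List.any_eq_false.mp h)
    simp [h0]
  | true =>
    obtain ⟨x, hx, hc⟩ := List.any_eq_true.mp h
    have : 0 < w.countP (fun x => w.count x == 1) := List.countP_pos_iff.mpr ⟨x, hx, hc⟩
    have hne : w.countP (fun x => w.count x == 1) ≠ 0 := Nat.pos_iff_ne_zero.mp this
    simp [hne]

theorem pvU_pos_of_count_one (w : List Int) (x : Int) (h : w.count x = 1) : 1 ≤ pvU w := by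
  unfold pvU
  rw [pv_countP_split w _ (fun y => y == x), pv_countP_beq_and]
  simp [h]

theorem pvU_append (w : List Int) (x : Int) :
    pvU (w ++ [x]) = if w.count x = 0 then pvU w + 1
      else if w.count x = 1 then pvU w - 1 else pvU w := by
  unfold pvU
  rw [List.countP_append]
  have hsingle : List.countP (fun y => (w ++ [x]).count y == 1) [x]
      = if w.count x = 0 then 1 else 0 := by
    simp [List.countP_singleton, List.count_append]
  have hcongr : (fun y => !(y == x) && ((w ++ [x]).count y == 1))
      = (fun y => !(y == x) && (w.count y == 1)) := by
    funext y
    by_cases hyx : y = x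
    · simp [hyx]
    · simp [List.count_append, Ne.symm hyx]
  have h1 := pv_countP_split w (fun y => (w ++ [x]).count y == 1) (fun y => y == x)
  have h2 := pv_countP_split w (fun y => w.count y == 1) (fun y => y == x)
  rw [pv_countP_beq_and] at h1 h2
  rw [hcongr] at h1
  have hzero : (if ((w ++ [x]).count x == 1) = true then w.count x else 0) = 0 := by
    rcases Nat.eq_zero_or_pos (w.count x) with h | h
    · simp [h]
    · have hf : ((w ++ [x]).count x == 1) = false := by
        simp [List.count_append]; omega
      rw [hf]; simp
  rw [hzero] at h1
  rw [h1, hsingle]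
  by_cases hc1 : w.count x = 1
  · rw [if_pos (by simp [hc1])] at h2
    split_ifs <;> omega
  · rw [if_neg (by simp [hc1])] at h2
    split_ifs <;> omega

theorem pvW_succ (a : List Int) (s e : Nat) (hs : s ≤ e) (he : e < a.length) :
    pvW a s (e + 1) = pvW a s e ++ [a[e]] := by
  unfold pvW
  have h1 : e + 1 - s = (e - s) + 1 := by omega
  rw [h1, List.take_add_one]
  congr 1
  rw [List.getElem?_drop]
  rw [List.getElem?_eq_getElem (by omega : s + (e - s) < a.length)]
  simp; congr 1; omega

theorem pvInnerB_eq_loopEndA (a : List Int) (s e : Nat) (hs : s ≤ e) (he : e ≤ a.length)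
    (cnt : PySem.Dict Int Int) (uniq : Int)
    (hc : ∀ x, cnt.getD x 0 = (((pvW a s e).count x : Int)))
    (hu : uniq = ((pvU (pvW a s e) : Int))) :
    pvInnerB a (PySem.List.pyRange (e : Int) (a.length : Int) 1) cnt uniq
      = pvLoopEndA a (s : Int) (PySem.List.pyRange ((e : Int) + 1) ((a.length : Int) + 1) 1) := by
  induction hk : a.length - e generalizing e cnt uniq with
  | zero =>
    have heq : e = a.length := by omega
    subst heq
    rw [PySem.List.pyRange_one_eq_nil le_rfl, PySem.List.pyRange_one_eq_nil le_rfl]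
    rfl
  | succ k ih =>
    have hlt : e < a.length := by omega
    have hltI : (e : Int) < (a.length : Int) := by exact_mod_cast hlt
    rw [PySem.List.pyRange_one_cons hltI,
        PySem.List.pyRange_one_cons (by omega : (e : Int) + 1 < (a.length : Int) + 1)]
    simp only [pvInnerB, pvLoopEndA]
    have hx : PySem.List.pyGetD a (e : Int) 0 = a[e] := by
      rw [PySem.List.pyGetD_natCast]
      exact List.getD_eq_getElem a 0 hlt
    have hW : pvW a s (e + 1) = pvW a s e ++ [a[e]] := pvW_succ a s e hs hlt
    have hcount : ∀ y : Int, (pvW a s (e + 1)).count y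
        = (pvW a s e).count y + (if y = a[e] then 1 else 0) := by
      intro y
      rw [hW, List.count_append, List.count_singleton]
      by_cases hy : y = a[e]
      · simp [hy]
      · simp [hy, Ne.symm hy]
    -- the slice in A's loop is the window a[s:e+1]
    have hslice : PySem.List.slice a (some (s : Int)) (some ((e : Int) + 1))
        = pvW a s (e + 1) := by
      have : ((e : Int) + 1) = (((e + 1 : Nat)) : Int) := by push_cast; ring
      rw [this, PySem.List.slice_natCast]
      rfl
    -- the new uniq is pvU of the extended window
    have hc' := hc a[e]
    have huniq' : (if (cnt.getD (PySem.List.pyGetD a (e : Int) 0) 0) == 0 then uniq + 1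
        else if (cnt.getD (PySem.List.pyGetD a (e : Int) 0) 0) == 1 then uniq - 1 else uniq)
        = ((pvU (pvW a s (e + 1)) : Int)) := by
      rw [hx, hc', hu, hW, pvU_append (pvW a s e) a[e]]
      by_cases h0 : (pvW a s e).count a[e] = 0
      · simp [h0]
      · by_cases h1 : (pvW a s e).count a[e] = 1
        · have := pvU_pos_of_count_one (pvW a s e) a[e] h1
          simp only [h1]
          norm_num
          omega
        · have hb0 : (((pvW a s e).count a[e] : Int) == 0) = false := by
            simp; omega
          have hb1 : (((pvW a s e).count a[e] : Int) == 1) = false := by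
            simp; omega
          rw [hb0, hb1]
          simp [h0, h1]
    rw [huniq', hslice, pvIsUniqueA_eq]
    by_cases hz : pvU (pvW a s (e + 1)) = 0
    · simp [hz]
    · have hzb : (((pvU (pvW a s (e + 1)) : Int)) == 0) = false := by simp; omega
      have hzb2 : (pvU (pvW a s (e + 1)) == 0) = false := by simp [hz]
      rw [hzb, hzb2]
      simp only [Bool.not_false, Bool.not_true, Bool.false_eq_true, if_false]
      have hrec := ih (e + 1) (by omega) (by omega) (cnt.insert (PySem.List.pyGetD a (e : Int) 0)
          (cnt.getD (PySem.List.pyGetD a (e : Int) 0) 0 + 1)) ((pvU (pvW a s (e + 1)) : Int))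
          (by
            intro y
            rw [hx, PySem.Dict.getD_insert, hcount y]
            by_cases hy : y = a[e]
            · simp [hy, hc']
            · simp [hy, hc y])
          rfl (by omega)
      rw [hx] at hrec ⊢
      push_cast at hrec ⊢
      exact hrec

theorem pvOuterB_eq_loopStartA (a : List Int) (l : List Int)
    (h : ∀ s ∈ l, 0 ≤ s ∧ s ≤ (a.length : Int)) :
    pvOuterB a l = pvLoopStartA a l := by
  induction l with
  | nil => rfl
  | cons s t ih =>
    obtain ⟨h0, hle⟩ := h s (by simp)
    obtain ⟨k, rfl⟩ : ∃ k : Nat, s = (k : Int) := ⟨s.toNat, (Int.toNat_of_nonneg h0).symm⟩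
    simp only [pvOuterB, pvLoopStartA]
    have hinner := pvInnerB_eq_loopEndA a k k le_rfl (by exact_mod_cast hle)
        PySem.Dict.empty 0
        (by intro x; simp [pvW, PySem.Dict.getD_empty])
        (by simp [pvW, pvU])
    rw [hinner, ih (fun s hs => h s (by simp [hs]))]

-- ===== VERDICT (by name: the statement is the Claim_ definition above) =====
theorem is_unique_sequence_spec : Claim_equal_is_unique_sequence := by
  intro a _
  unfold Spec_is_unique_sequence is_unique_sequence is_unique_sequence_alt
  refine (pvOuterB_eq_loopStartA a _ (fun s hs => ?_)).symm
  have := PySem.List.mem_pyRange_one.mp hs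
  omega
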